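-- pv_equiv track=rewrite | github.com/ouazzmoh/stable-humanoid | src/utils.py | group_not_none
-- ===== SOURCE A (Python) =====
-- def group_not_none(lst):
--     """
--     Return the start and end indices of the groups of non-None values in the list.
--     Args:
--         lst:
--
--     Returns:
--
--     """
--     start = None  # Start index of the current group
--     groups = []  # List of groups
--     for i, x in enumerate(lst):
--         if x is not None and start is None:
--             start = i  # Start a new group
--         elif x is None and start is not None:
--             groups.append((start, i - 1))  # End the current group
--             start = None
--     # If the list ended with a group, add it
--     if start is not None:
--         groups.append((start, len(lst) - 1))
--     return groups
-- ===== SOURCE B (Python) =====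
-- def group_not_none(lst):
--     """Return (start, end) index pairs of the maximal runs of non-None values."""
--     groups = []
--     i, n = 0, len(lst)
--     while i < n:
--         if lst[i] is None:
--             i += 1
--         else:
--             j = i + 1
--             while j < n and lst[j] is not None:
--                 j += 1
--             groups.append((i, j - 1))
--             i = j
--     return groups
-- ===== Notes on version B (the rewrite author's own statement) =====
-- stated objective: alternative
-- what changed: Replaces A's per-element state machine (an Optional start flag threaded through one enumerate loop plus a post-loop flush) by a run-consuming two-level scan: an outer cursor skips None entries and, on a non-None entry, an inner scan jumps to the end of the run and emits the pair at once, with no pending-state flush.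
import Mathlib
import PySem

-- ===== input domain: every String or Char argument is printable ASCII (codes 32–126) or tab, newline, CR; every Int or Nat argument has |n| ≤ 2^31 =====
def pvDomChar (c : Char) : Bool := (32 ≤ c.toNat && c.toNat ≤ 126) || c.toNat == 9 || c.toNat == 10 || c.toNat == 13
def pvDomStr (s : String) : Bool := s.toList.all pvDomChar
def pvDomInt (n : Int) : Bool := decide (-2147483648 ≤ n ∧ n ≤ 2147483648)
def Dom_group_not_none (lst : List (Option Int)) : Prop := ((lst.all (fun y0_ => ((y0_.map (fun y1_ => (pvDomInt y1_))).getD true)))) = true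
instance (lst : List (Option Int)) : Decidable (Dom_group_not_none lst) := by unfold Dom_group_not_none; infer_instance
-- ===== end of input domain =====

-- B is an alternative, run-consuming scan (outer cursor skips Nones, inner scan eats a whole
-- run and emits its pair at once) replacing A's per-element state machine; same O(n) cost.

-- ===== PORT A =====
-- the 'for i, x in enumerate(lst)' loop, threading (start, groups)
def gnnA_loop : List (Option Int) → Int → Option Int → List (Int × Int) → Option Int × List (Int × Int)
  | [], _, start, groups => (start, groups)
  | x :: rest, i, start, groups =>
    match x, start with
    | some _, none => gnnA_loop rest (i + 1) (some i) groups          -- x is not None and start is None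
    | none, some s => gnnA_loop rest (i + 1) none (groups ++ [(s, i - 1)])  -- x is None and start is not None
    | _, _ => gnnA_loop rest (i + 1) start groups

-- the post-loop flush: 'if start is not None: groups.append((start, len(lst) - 1))'
def gnnA_finish (len : Int) : Option Int × List (Int × Int) → List (Int × Int)
  | (some s, groups) => groups ++ [(s, len - 1)]
  | (none, groups) => groups

def group_not_none (lst : List (Option Int)) : List (Int × Int) :=
  gnnA_finish (lst.length : Int) (gnnA_loop lst 0 none [])

-- ===== PORT B =====
-- the inner 'while j < n and lst[j] is not None: j += 1' scan: length of the leading non-None run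
def gnnB_runlen : List (Option Int) → Nat
  | some _ :: r => gnnB_runlen r + 1
  | _ => 0

-- the outer 'while i < n' cursor loop
def gnnB_aux : List (Option Int) → Int → List (Int × Int)
  | [], _ => []
  | none :: rest, i => gnnB_aux rest (i + 1)
  | some _ :: rest, i =>
    let k := gnnB_runlen rest
    (i, i + (k : Int)) :: gnnB_aux (rest.drop k) (i + (k : Int) + 1)
termination_by l _ => l.length
decreasing_by
  all_goals simp

def group_not_none_alt (lst : List (Option Int)) : List (Int × Int) :=
  gnnB_aux lst 0

-- ===== PRECONDITION & SPEC =====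
def Spec_group_not_none (lst : List (Option Int)) (out : List (Int × Int)) : Prop := out = group_not_none_alt lst
instance (lst : List (Option Int)) (out : List (Int × Int)) : Decidable (Spec_group_not_none lst out) := by unfold Spec_group_not_none; infer_instance

-- ===== CLAIM (what is proved, stated in full; the proofs are below) =====
def Claim_equal_group_not_none : Prop := ∀ (lst : List (Option Int)), Dom_group_not_none lst → Spec_group_not_none lst (group_not_none lst)

-- ===== LEMMAS AND PROOFS =====

-- One invariant for both loop states: flushing A's loop result equals the emitted groups plus
-- B's remaining scan (with the pending group, if any, closed at the end of its run).
theorem gnn_main : ∀ (rest : List (Option Int)) (i : Int) (start : Option Int) (groups : List (Int × Int)),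
    gnnA_finish (i + (rest.length : Int)) (gnnA_loop rest i start groups) =
      match start with
      | none => groups ++ gnnB_aux rest i
      | some s => groups ++ (s, i + (gnnB_runlen rest : Int) - 1)
            :: gnnB_aux (rest.drop (gnnB_runlen rest)) (i + (gnnB_runlen rest : Int))
  | [], i, start, groups => by
      cases start <;> simp [gnnA_loop, gnnA_finish, gnnB_aux, gnnB_runlen]
  | none :: rest, i, start, groups => by
      cases start with
      | none =>
          have h := gnn_main rest (i + 1) none groups
          simp only [gnnA_loop, gnnB_aux, List.length_cons] at *
          rw [show i + ((rest.length + 1 : Nat) : Int) = i + 1 + (rest.length : Int) from by push_cast; ring]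
          exact h
      | some s =>
          have h := gnn_main rest (i + 1) none (groups ++ [(s, i - 1)])
          simp only [gnnA_loop, gnnB_aux, gnnB_runlen, List.drop, List.length_cons,
            Nat.cast_zero, add_zero] at *
          rw [show i + ((rest.length + 1 : Nat) : Int) = i + 1 + (rest.length : Int) from by push_cast; ring, h]
          simp
  | some v :: rest, i, start, groups => by
      cases start with
      | none =>
          have h := gnn_main rest (i + 1) (some i) groups
          simp only [gnnA_loop, gnnB_aux, List.length_cons] at *
          rw [show i + ((rest.length + 1 : Nat) : Int) = i + 1 + (rest.length : Int) from by push_cast; ring, h]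
          have e1 : i + 1 + (gnnB_runlen rest : Int) - 1 = i + (gnnB_runlen rest : Int) := by ring
          have e2 : i + 1 + (gnnB_runlen rest : Int) = i + (gnnB_runlen rest : Int) + 1 := by ring
          rw [e1, e2]
      | some s =>
          have h := gnn_main rest (i + 1) (some s) groups
          simp only [gnnA_loop, gnnB_runlen, List.drop, List.length_cons,
            Nat.cast_add, Nat.cast_one] at *
          rw [show i + ((rest.length : Int) + 1) = i + 1 + (rest.length : Int) from by ring, h]
          have e1 : i + 1 + (gnnB_runlen rest : Int) - 1 = i + ((gnnB_runlen rest : Int) + 1) - 1 := by ring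
          have e2 : i + 1 + (gnnB_runlen rest : Int) = i + ((gnnB_runlen rest : Int) + 1) := by ring
          rw [e1, e2]

-- ===== VERDICT (by name: the statement is the Claim_ definition above) =====
theorem group_not_none_spec : Claim_equal_group_not_none := by
  intro lst _
  have h := gnn_main lst 0 none []
  simp only [zero_add] at h
  unfold Spec_group_not_none group_not_none group_not_none_alt
  simpa using h
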